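-- pv_equiv track=rewrite | github.com/alxd/rag | visualize-gui/src_old/visualize_smith_gui - Copy (6).py | normalize_word
-- ===== SOURCE A (Python) =====
-- def normalize_word(word):
--     """Normalize word by removing plurals and common variations"""
--     word = word.lower().strip()
--
--     # Handle common plural forms
--     if word.endswith('ies') and len(word) > 4:
--         return word[:-3] + 'y'
--     elif word.endswith('es') and len(word) > 3:
--         return word[:-2]
--     elif word.endswith('s') and len(word) > 2:
--         return word[:-1]
--
--     # Handle common suffixes
--     suffixes = ['ing', 'ed', 'er', 'est', 'ly', 'tion', 'sion', 'ness', 'ment', 'able', 'ible', 'ful', 'less']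
--     for suffix in suffixes:
--         if word.endswith(suffix) and len(word) > len(suffix) + 2:
--             return word[:-len(suffix)]
--
--     return word
-- ===== SOURCE B (Python) =====
-- _RULES = [
--     # (suffix, group, cut, min_len_exclusive, append_y_count)
--     ('ies', 0, 3, 4, 1), ('es', 0, 2, 3, 0), ('s', 0, 1, 2, 0),
--     ('ing', 1, 3, 5, 0), ('ed', 1, 2, 4, 0), ('er', 1, 2, 4, 0),
--     ('est', 1, 3, 5, 0), ('ly', 1, 2, 4, 0), ('tion', 1, 4, 6, 0),
--     ('sion', 1, 4, 6, 0), ('ness', 1, 4, 6, 0), ('ment', 1, 4, 6, 0),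
--     ('able', 1, 4, 6, 0), ('ible', 1, 4, 6, 0), ('ful', 1, 3, 5, 0),
--     ('less', 1, 4, 6, 0),
-- ]
--
-- def normalize_word(word):
--     """Normalize word by removing plurals and common variations."""
--     w = word.lower().strip()
--     matches = [(g, -len(suf), cut, ys)
--                for suf, g, cut, minl, ys in _RULES
--                if w.endswith(suf) and len(w) > minl]
--     if not matches:
--         return w
--     _, _, cut, ys = min(matches)
--     return w[:-cut] + 'y' * ys
-- ===== Notes on version B (the rewrite author's own statement) =====
-- stated objective: alternative
-- what changed: A scans rules in a fixed order and returns at the first hit (if/elif chain then a suffix loop); B instead collects ALL applicable (suffix, length-threshold) rules in one comprehension and selects the winner with min() under a (group, -suffix_length) priority key, proving order-independence of the rule set.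
import Mathlib
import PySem

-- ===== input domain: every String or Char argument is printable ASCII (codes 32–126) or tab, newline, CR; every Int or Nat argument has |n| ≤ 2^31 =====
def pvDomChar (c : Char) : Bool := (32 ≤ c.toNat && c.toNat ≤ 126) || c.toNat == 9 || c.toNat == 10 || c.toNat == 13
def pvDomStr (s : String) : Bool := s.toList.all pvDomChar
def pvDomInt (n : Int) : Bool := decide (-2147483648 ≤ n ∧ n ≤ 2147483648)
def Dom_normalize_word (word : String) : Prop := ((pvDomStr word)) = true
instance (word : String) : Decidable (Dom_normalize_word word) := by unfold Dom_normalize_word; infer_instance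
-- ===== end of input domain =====

-- B replaces A's ordered early-return scan (if/elif chain then a suffix loop) by a rule-free selection:
-- collect ALL applicable rules at once and pick the winner by a priority key with min() (objective: alternative).

-- ===== PORT A =====
-- the suffixes list of A
def pvSuffixesA : List (List Char) :=
  [['i','n','g'], ['e','d'], ['e','r'], ['e','s','t'], ['l','y'], ['t','i','o','n'],
   ['s','i','o','n'], ['n','e','s','s'], ['m','e','n','t'], ['a','b','l','e'],
   ['i','b','l','e'], ['f','u','l'], ['l','e','s','s']]

-- A's 'for suffix in suffixes: …' loop with early return
def pvLoopA (w : List Char) : List (List Char) → List Char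
  | [] => w
  | suf :: rest =>
    if PySem.Chars.endswith w suf && decide (((w.length : Int)) > (suf.length : Int) + 2)
    then PySem.Chars.slice w none (some (-(suf.length : Int)))
    else pvLoopA w rest

-- A's body after 'word = word.lower().strip()'
def pvChainA (w : List Char) : List Char :=
  if PySem.Chars.endswith w ['i','e','s'] && decide (((w.length : Int)) > 4) then
    PySem.Chars.slice w none (some (-3)) ++ ['y']
  else if PySem.Chars.endswith w ['e','s'] && decide (((w.length : Int)) > 3) then
    PySem.Chars.slice w none (some (-2))
  else if PySem.Chars.endswith w ['s'] && decide (((w.length : Int)) > 2) then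
    PySem.Chars.slice w none (some (-1))
  else pvLoopA w pvSuffixesA

def normalize_word (word : String) : String :=
  String.ofList (pvChainA (PySem.Chars.strip (PySem.Chars.lower word.toList)))

-- ===== PORT B =====
-- B's rule table: (suffix, group, cut, exclusive min length, how many 'y' to append)
def pvRulesB : List (List Char × Int × Int × Int × Int) :=
  [(['i','e','s'], 0, 3, 4, 1), (['e','s'], 0, 2, 3, 0), (['s'], 0, 1, 2, 0),
   (['i','n','g'], 1, 3, 5, 0), (['e','d'], 1, 2, 4, 0), (['e','r'], 1, 2, 4, 0),
   (['e','s','t'], 1, 3, 5, 0), (['l','y'], 1, 2, 4, 0), (['t','i','o','n'], 1, 4, 6, 0),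
   (['s','i','o','n'], 1, 4, 6, 0), (['n','e','s','s'], 1, 4, 6, 0), (['m','e','n','t'], 1, 4, 6, 0),
   (['a','b','l','e'], 1, 4, 6, 0), (['i','b','l','e'], 1, 4, 6, 0), (['f','u','l'], 1, 3, 5, 0),
   (['l','e','s','s'], 1, 4, 6, 0)]

-- the list comprehension: all applicable rules, projected to (group, -len(suf), cut, ys)
def pvMatchesB (w : List Char) : List (Int × Int × Int × Int) :=
  (pvRulesB.filter (fun r => PySem.Chars.endswith w r.1 && decide ((w.length : Int) > r.2.2.2.1))).map
    (fun r => (r.2.1, -(r.1.length : Int), r.2.2.1, r.2.2.2.2))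

-- Python tuple '<' on four ints (lexicographic)
def pvTupLt (a b : Int × Int × Int × Int) : Bool :=
  a.1 < b.1 || (a.1 == b.1 && (a.2.1 < b.2.1 || (a.2.1 == b.2.1 &&
    (a.2.2.1 < b.2.2.1 || (a.2.2.1 == b.2.2.1 && a.2.2.2 < b.2.2.2)))))

-- builtin min(): keep the current minimum, replace when a later item is strictly smaller
def pvMinB (x : Int × Int × Int × Int) (xs : List (Int × Int × Int × Int)) : Int × Int × Int × Int :=
  xs.foldl (fun m y => if pvTupLt y m then y else m) x

-- B's body after 'w = word.lower().strip()'
def pvCoreB (w : List Char) : List Char :=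
  match pvMatchesB w with
  | [] => w
  | x :: rest =>
    let m := pvMinB x rest
    PySem.Chars.slice w none (some (-m.2.2.1)) ++ List.replicate m.2.2.2.toNat 'y'

def normalize_word_alt (word : String) : String :=
  String.ofList (pvCoreB (PySem.Chars.strip (PySem.Chars.lower word.toList)))

-- ===== PRECONDITION & SPEC =====
def Spec_normalize_word (word : String) (out : String) : Prop := out = normalize_word_alt word
instance (word : String) (out : String) : Decidable (Spec_normalize_word word out) := by unfold Spec_normalize_word; infer_instance

-- ===== CLAIM =====
def Claim_equal_normalize_word : Prop := ∀ (word : String), Dom_normalize_word word → Spec_normalize_word word (normalize_word word)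

-- ===== LEMMAS AND PROOFS =====
-- two suffixes of the same list are comparable: the shorter is a suffix of the longer
theorem pvSuffAnti {w s1 s2 : List Char} (h1 : s1 <:+ w) (h2 : s2 <:+ w)
    (h : s1.length ≤ s2.length) : s1 <:+ s2 := by
  obtain ⟨t1, rfl⟩ := h1
  obtain ⟨t2, ht⟩ := h2
  have hs1 : s1 = (t1 ++ s1).drop t1.length := by simp
  have hs2 : s2 = (t1 ++ s1).drop t2.length := by rw [← ht]; simp
  have hlen : t2.length ≤ t1.length := by
    have := congrArg List.length ht; simp at this; omega
  rw [hs1, hs2]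
  have hd : (t1 ++ s1).drop t1.length = ((t1 ++ s1).drop t2.length).drop (t1.length - t2.length) := by
    rw [List.drop_drop]; congr 1; omega
  rw [hd]
  exact List.drop_suffix _ _

theorem pvMono {w s1 s2 : List Char} (h : PySem.Chars.endswith w s1 = true)
    (hsub : s2 <:+ s1) : PySem.Chars.endswith w s2 = true := by
  rw [PySem.Chars.endswith_iff] at *
  exact hsub.trans h

theorem pvMonoNot {w s1 s2 : List Char} (h : PySem.Chars.endswith w s2 = false)
    (hsub : s2 <:+ s1) : PySem.Chars.endswith w s1 = false := by
  by_contra hb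
  have h1 : PySem.Chars.endswith w s1 = true := by
    cases hh : PySem.Chars.endswith w s1 <;> simp_all
  simp [pvMono h1 hsub] at h

theorem pvNotBoth {w s1 s2 : List Char} (h1 : PySem.Chars.endswith w s1 = true)
    (h12 : ¬ s1 <:+ s2) (h21 : ¬ s2 <:+ s1) : PySem.Chars.endswith w s2 = false := by
  by_contra hb
  have h2 : PySem.Chars.endswith w s2 = true := by
    cases hh : PySem.Chars.endswith w s2 <;> simp_all
  rw [PySem.Chars.endswith_iff] at h1 h2
  rcases Nat.le_total s1.length s2.length with h | h
  · exact h12 (pvSuffAnti h1 h2 h)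
  · exact h21 (pvSuffAnti h2 h1 h)

theorem pvBF {b : Bool} (h : ¬ b = true) : b = false := by
  cases b
  · rfl
  · exact absurd rfl h

theorem pvCoreEq (w : List Char) : pvChainA w = pvCoreB w := by
  by_cases hS : PySem.Chars.endswith w ['s'] = true
  · -- w ends with 's': no non-s loop suffix can match
    have h_ing : PySem.Chars.endswith w ['i','n','g'] = false := pvNotBoth hS (by decide) (by decide)
    have h_ed : PySem.Chars.endswith w ['e','d'] = false := pvNotBoth hS (by decide) (by decide)
    have h_er : PySem.Chars.endswith w ['e','r'] = false := pvNotBoth hS (by decide) (by decide)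
    have h_est : PySem.Chars.endswith w ['e','s','t'] = false := pvNotBoth hS (by decide) (by decide)
    have h_ly : PySem.Chars.endswith w ['l','y'] = false := pvNotBoth hS (by decide) (by decide)
    have h_tion : PySem.Chars.endswith w ['t','i','o','n'] = false := pvNotBoth hS (by decide) (by decide)
    have h_sion : PySem.Chars.endswith w ['s','i','o','n'] = false := pvNotBoth hS (by decide) (by decide)
    have h_ment : PySem.Chars.endswith w ['m','e','n','t'] = false := pvNotBoth hS (by decide) (by decide)
    have h_able : PySem.Chars.endswith w ['a','b','l','e'] = false := pvNotBoth hS (by decide) (by decide)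
    have h_ible : PySem.Chars.endswith w ['i','b','l','e'] = false := pvNotBoth hS (by decide) (by decide)
    have h_ful : PySem.Chars.endswith w ['f','u','l'] = false := pvNotBoth hS (by decide) (by decide)
    by_cases hies : PySem.Chars.endswith w ['i','e','s'] = true
    · have hes : PySem.Chars.endswith w ['e','s'] = true := pvMono hies (by decide)
      have hless : PySem.Chars.endswith w ['l','e','s','s'] = false := pvNotBoth hies (by decide) (by decide)
      have hness : PySem.Chars.endswith w ['n','e','s','s'] = false := pvNotBoth hies (by decide) (by decide)
      by_cases h4 : (4 : Int) < (w.length : Int)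
      · have h3 : (3 : Int) < (w.length : Int) := by omega
        have h2 : (2 : Int) < (w.length : Int) := by omega
        simp [pvChainA, pvLoopA, pvSuffixesA, pvCoreB, pvMatchesB, pvRulesB, pvMinB, pvTupLt, h_ing, h_ed, h_er, h_est, h_ly, h_tion, h_sion, h_ment, h_able, h_ible, h_ful, hies, hes, hS, hless, hness, h4, h3, h2]
      · by_cases h3 : (3 : Int) < (w.length : Int)
        · have h2 : (2 : Int) < (w.length : Int) := by omega
          simp [pvChainA, pvLoopA, pvSuffixesA, pvCoreB, pvMatchesB, pvRulesB, pvMinB, pvTupLt, h_ing, h_ed, h_er, h_est, h_ly, h_tion, h_sion, h_ment, h_able, h_ible, h_ful, hies, hes, hS, hless, hness, h4, h3, h2]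
        · by_cases h2 : (2 : Int) < (w.length : Int)
          · simp [pvChainA, pvLoopA, pvSuffixesA, pvCoreB, pvMatchesB, pvRulesB, pvMinB, pvTupLt, h_ing, h_ed, h_er, h_est, h_ly, h_tion, h_sion, h_ment, h_able, h_ible, h_ful, hies, hes, hS, hless, hness, h4, h3, h2]
          · simp [pvChainA, pvLoopA, pvSuffixesA, pvCoreB, pvMatchesB, pvRulesB, pvMinB, pvTupLt, h_ing, h_ed, h_er, h_est, h_ly, h_tion, h_sion, h_ment, h_able, h_ible, h_ful, hies, hes, hS, hless, hness, h4, h3, h2]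
    · have hies' : PySem.Chars.endswith w ['i','e','s'] = false := pvBF hies
      by_cases hes : PySem.Chars.endswith w ['e','s'] = true
      · have hless : PySem.Chars.endswith w ['l','e','s','s'] = false := pvNotBoth hes (by decide) (by decide)
        have hness : PySem.Chars.endswith w ['n','e','s','s'] = false := pvNotBoth hes (by decide) (by decide)
        by_cases h3 : (3 : Int) < (w.length : Int)
        · have h2 : (2 : Int) < (w.length : Int) := by omega
          simp [pvChainA, pvLoopA, pvSuffixesA, pvCoreB, pvMatchesB, pvRulesB, pvMinB, pvTupLt, h_ing, h_ed, h_er, h_est, h_ly, h_tion, h_sion, h_ment, h_able, h_ible, h_ful, hies', hes, hS, hless, hness, h3, h2]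
        · by_cases h2 : (2 : Int) < (w.length : Int)
          · simp [pvChainA, pvLoopA, pvSuffixesA, pvCoreB, pvMatchesB, pvRulesB, pvMinB, pvTupLt, h_ing, h_ed, h_er, h_est, h_ly, h_tion, h_sion, h_ment, h_able, h_ible, h_ful, hies', hes, hS, hless, hness, h3, h2]
          · simp [pvChainA, pvLoopA, pvSuffixesA, pvCoreB, pvMatchesB, pvRulesB, pvMinB, pvTupLt, h_ing, h_ed, h_er, h_est, h_ly, h_tion, h_sion, h_ment, h_able, h_ible, h_ful, hies', hes, hS, hless, hness, h3, h2]
      · have hes' : PySem.Chars.endswith w ['e','s'] = false := pvBF hes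
        by_cases h2 : (2 : Int) < (w.length : Int)
        · by_cases hless : PySem.Chars.endswith w ['l','e','s','s'] = true
          · have hness : PySem.Chars.endswith w ['n','e','s','s'] = false := pvNotBoth hless (by decide) (by decide)
            by_cases h6 : (6 : Int) < (w.length : Int)
            · simp [pvChainA, pvLoopA, pvSuffixesA, pvCoreB, pvMatchesB, pvRulesB, pvMinB, pvTupLt, h_ing, h_ed, h_er, h_est, h_ly, h_tion, h_sion, h_ment, h_able, h_ible, h_ful, hies', hes', hS, hless, hness, h2, h6]
            · simp [pvChainA, pvLoopA, pvSuffixesA, pvCoreB, pvMatchesB, pvRulesB, pvMinB, pvTupLt, h_ing, h_ed, h_er, h_est, h_ly, h_tion, h_sion, h_ment, h_able, h_ible, h_ful, hies', hes', hS, hless, hness, h2, h6]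
          · have hless' : PySem.Chars.endswith w ['l','e','s','s'] = false := pvBF hless
            by_cases hness : PySem.Chars.endswith w ['n','e','s','s'] = true
            · by_cases h6 : (6 : Int) < (w.length : Int)
              · simp [pvChainA, pvLoopA, pvSuffixesA, pvCoreB, pvMatchesB, pvRulesB, pvMinB, pvTupLt, h_ing, h_ed, h_er, h_est, h_ly, h_tion, h_sion, h_ment, h_able, h_ible, h_ful, hies', hes', hS, hless', hness, h2, h6]
              · simp [pvChainA, pvLoopA, pvSuffixesA, pvCoreB, pvMatchesB, pvRulesB, pvMinB, pvTupLt, h_ing, h_ed, h_er, h_est, h_ly, h_tion, h_sion, h_ment, h_able, h_ible, h_ful, hies', hes', hS, hless', hness, h2, h6]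
            · have hness' : PySem.Chars.endswith w ['n','e','s','s'] = false := pvBF hness
              simp [pvChainA, pvLoopA, pvSuffixesA, pvCoreB, pvMatchesB, pvRulesB, pvMinB, pvTupLt, h_ing, h_ed, h_er, h_est, h_ly, h_tion, h_sion, h_ment, h_able, h_ible, h_ful, hies', hes', hS, hless', hness', h2]
        · have h6 : ¬ (6 : Int) < (w.length : Int) := by omega
          simp [pvChainA, pvLoopA, pvSuffixesA, pvCoreB, pvMatchesB, pvRulesB, pvMinB, pvTupLt, h_ing, h_ed, h_er, h_est, h_ly, h_tion, h_sion, h_ment, h_able, h_ible, h_ful, hies', hes', hS, h2, h6]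
  · have hS' : PySem.Chars.endswith w ['s'] = false := pvBF hS
    have hies' : PySem.Chars.endswith w ['i','e','s'] = false := pvMonoNot hS' (by decide)
    have hes' : PySem.Chars.endswith w ['e','s'] = false := pvMonoNot hS' (by decide)
    have hless' : PySem.Chars.endswith w ['l','e','s','s'] = false := pvMonoNot hS' (by decide)
    have hness' : PySem.Chars.endswith w ['n','e','s','s'] = false := pvMonoNot hS' (by decide)
    by_cases h_ing : PySem.Chars.endswith w ['i','n','g'] = true
    · have h_ed : PySem.Chars.endswith w ['e','d'] = false := pvNotBoth h_ing (by decide) (by decide)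
      have h_er : PySem.Chars.endswith w ['e','r'] = false := pvNotBoth h_ing (by decide) (by decide)
      have h_est : PySem.Chars.endswith w ['e','s','t'] = false := pvNotBoth h_ing (by decide) (by decide)
      have h_ly : PySem.Chars.endswith w ['l','y'] = false := pvNotBoth h_ing (by decide) (by decide)
      have h_tion : PySem.Chars.endswith w ['t','i','o','n'] = false := pvNotBoth h_ing (by decide) (by decide)
      have h_sion : PySem.Chars.endswith w ['s','i','o','n'] = false := pvNotBoth h_ing (by decide) (by decide)
      have h_ment : PySem.Chars.endswith w ['m','e','n','t'] = false := pvNotBoth h_ing (by decide) (by decide)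
      have h_able : PySem.Chars.endswith w ['a','b','l','e'] = false := pvNotBoth h_ing (by decide) (by decide)
      have h_ible : PySem.Chars.endswith w ['i','b','l','e'] = false := pvNotBoth h_ing (by decide) (by decide)
      have h_ful : PySem.Chars.endswith w ['f','u','l'] = false := pvNotBoth h_ing (by decide) (by decide)
      by_cases hm : (5 : Int) < (w.length : Int)
      · simp [pvChainA, pvLoopA, pvSuffixesA, pvCoreB, pvMatchesB, pvRulesB, pvMinB, pvTupLt, hS', hies', hes', hless', hness', h_ing, h_ed, h_er, h_est, h_ly, h_tion, h_sion, h_ment, h_able, h_ible, h_ful, hm]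
      · simp [pvChainA, pvLoopA, pvSuffixesA, pvCoreB, pvMatchesB, pvRulesB, pvMinB, pvTupLt, hS', hies', hes', hless', hness', h_ing, h_ed, h_er, h_est, h_ly, h_tion, h_sion, h_ment, h_able, h_ible, h_ful, hm]
    · have h_ing' : PySem.Chars.endswith w ['i','n','g'] = false := pvBF h_ing
      by_cases h_ed : PySem.Chars.endswith w ['e','d'] = true
      · have h_er : PySem.Chars.endswith w ['e','r'] = false := pvNotBoth h_ed (by decide) (by decide)
        have h_est : PySem.Chars.endswith w ['e','s','t'] = false := pvNotBoth h_ed (by decide) (by decide)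
        have h_ly : PySem.Chars.endswith w ['l','y'] = false := pvNotBoth h_ed (by decide) (by decide)
        have h_tion : PySem.Chars.endswith w ['t','i','o','n'] = false := pvNotBoth h_ed (by decide) (by decide)
        have h_sion : PySem.Chars.endswith w ['s','i','o','n'] = false := pvNotBoth h_ed (by decide) (by decide)
        have h_ment : PySem.Chars.endswith w ['m','e','n','t'] = false := pvNotBoth h_ed (by decide) (by decide)
        have h_able : PySem.Chars.endswith w ['a','b','l','e'] = false := pvNotBoth h_ed (by decide) (by decide)
        have h_ible : PySem.Chars.endswith w ['i','b','l','e'] = false := pvNotBoth h_ed (by decide) (by decide)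
        have h_ful : PySem.Chars.endswith w ['f','u','l'] = false := pvNotBoth h_ed (by decide) (by decide)
        by_cases hm : (4 : Int) < (w.length : Int)
        · simp [pvChainA, pvLoopA, pvSuffixesA, pvCoreB, pvMatchesB, pvRulesB, pvMinB, pvTupLt, hS', hies', hes', hless', hness', h_ing', h_ed, h_er, h_est, h_ly, h_tion, h_sion, h_ment, h_able, h_ible, h_ful, hm]
        · simp [pvChainA, pvLoopA, pvSuffixesA, pvCoreB, pvMatchesB, pvRulesB, pvMinB, pvTupLt, hS', hies', hes', hless', hness', h_ing', h_ed, h_er, h_est, h_ly, h_tion, h_sion, h_ment, h_able, h_ible, h_ful, hm]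
      · have h_ed' : PySem.Chars.endswith w ['e','d'] = false := pvBF h_ed
        by_cases h_er : PySem.Chars.endswith w ['e','r'] = true
        · have h_est : PySem.Chars.endswith w ['e','s','t'] = false := pvNotBoth h_er (by decide) (by decide)
          have h_ly : PySem.Chars.endswith w ['l','y'] = false := pvNotBoth h_er (by decide) (by decide)
          have h_tion : PySem.Chars.endswith w ['t','i','o','n'] = false := pvNotBoth h_er (by decide) (by decide)
          have h_sion : PySem.Chars.endswith w ['s','i','o','n'] = false := pvNotBoth h_er (by decide) (by decide)
          have h_ment : PySem.Chars.endswith w ['m','e','n','t'] = false := pvNotBoth h_er (by decide) (by decide)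
          have h_able : PySem.Chars.endswith w ['a','b','l','e'] = false := pvNotBoth h_er (by decide) (by decide)
          have h_ible : PySem.Chars.endswith w ['i','b','l','e'] = false := pvNotBoth h_er (by decide) (by decide)
          have h_ful : PySem.Chars.endswith w ['f','u','l'] = false := pvNotBoth h_er (by decide) (by decide)
          by_cases hm : (4 : Int) < (w.length : Int)
          · simp [pvChainA, pvLoopA, pvSuffixesA, pvCoreB, pvMatchesB, pvRulesB, pvMinB, pvTupLt, hS', hies', hes', hless', hness', h_ing', h_ed', h_er, h_est, h_ly, h_tion, h_sion, h_ment, h_able, h_ible, h_ful, hm]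
          · simp [pvChainA, pvLoopA, pvSuffixesA, pvCoreB, pvMatchesB, pvRulesB, pvMinB, pvTupLt, hS', hies', hes', hless', hness', h_ing', h_ed', h_er, h_est, h_ly, h_tion, h_sion, h_ment, h_able, h_ible, h_ful, hm]
        · have h_er' : PySem.Chars.endswith w ['e','r'] = false := pvBF h_er
          by_cases h_est : PySem.Chars.endswith w ['e','s','t'] = true
          · have h_ly : PySem.Chars.endswith w ['l','y'] = false := pvNotBoth h_est (by decide) (by decide)
            have h_tion : PySem.Chars.endswith w ['t','i','o','n'] = false := pvNotBoth h_est (by decide) (by decide)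
            have h_sion : PySem.Chars.endswith w ['s','i','o','n'] = false := pvNotBoth h_est (by decide) (by decide)
            have h_ment : PySem.Chars.endswith w ['m','e','n','t'] = false := pvNotBoth h_est (by decide) (by decide)
            have h_able : PySem.Chars.endswith w ['a','b','l','e'] = false := pvNotBoth h_est (by decide) (by decide)
            have h_ible : PySem.Chars.endswith w ['i','b','l','e'] = false := pvNotBoth h_est (by decide) (by decide)
            have h_ful : PySem.Chars.endswith w ['f','u','l'] = false := pvNotBoth h_est (by decide) (by decide)
            by_cases hm : (5 : Int) < (w.length : Int)
            · simp [pvChainA, pvLoopA, pvSuffixesA, pvCoreB, pvMatchesB, pvRulesB, pvMinB, pvTupLt, hS', hies', hes', hless', hness', h_ing', h_ed', h_er', h_est, h_ly, h_tion, h_sion, h_ment, h_able, h_ible, h_ful, hm]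
            · simp [pvChainA, pvLoopA, pvSuffixesA, pvCoreB, pvMatchesB, pvRulesB, pvMinB, pvTupLt, hS', hies', hes', hless', hness', h_ing', h_ed', h_er', h_est, h_ly, h_tion, h_sion, h_ment, h_able, h_ible, h_ful, hm]
          · have h_est' : PySem.Chars.endswith w ['e','s','t'] = false := pvBF h_est
            by_cases h_ly : PySem.Chars.endswith w ['l','y'] = true
            · have h_tion : PySem.Chars.endswith w ['t','i','o','n'] = false := pvNotBoth h_ly (by decide) (by decide)
              have h_sion : PySem.Chars.endswith w ['s','i','o','n'] = false := pvNotBoth h_ly (by decide) (by decide)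
              have h_ment : PySem.Chars.endswith w ['m','e','n','t'] = false := pvNotBoth h_ly (by decide) (by decide)
              have h_able : PySem.Chars.endswith w ['a','b','l','e'] = false := pvNotBoth h_ly (by decide) (by decide)
              have h_ible : PySem.Chars.endswith w ['i','b','l','e'] = false := pvNotBoth h_ly (by decide) (by decide)
              have h_ful : PySem.Chars.endswith w ['f','u','l'] = false := pvNotBoth h_ly (by decide) (by decide)
              by_cases hm : (4 : Int) < (w.length : Int)
              · simp [pvChainA, pvLoopA, pvSuffixesA, pvCoreB, pvMatchesB, pvRulesB, pvMinB, pvTupLt, hS', hies', hes', hless', hness', h_ing', h_ed', h_er', h_est', h_ly, h_tion, h_sion, h_ment, h_able, h_ible, h_ful, hm]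
              · simp [pvChainA, pvLoopA, pvSuffixesA, pvCoreB, pvMatchesB, pvRulesB, pvMinB, pvTupLt, hS', hies', hes', hless', hness', h_ing', h_ed', h_er', h_est', h_ly, h_tion, h_sion, h_ment, h_able, h_ible, h_ful, hm]
            · have h_ly' : PySem.Chars.endswith w ['l','y'] = false := pvBF h_ly
              by_cases h_tion : PySem.Chars.endswith w ['t','i','o','n'] = true
              · have h_sion : PySem.Chars.endswith w ['s','i','o','n'] = false := pvNotBoth h_tion (by decide) (by decide)
                have h_ment : PySem.Chars.endswith w ['m','e','n','t'] = false := pvNotBoth h_tion (by decide) (by decide)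
                have h_able : PySem.Chars.endswith w ['a','b','l','e'] = false := pvNotBoth h_tion (by decide) (by decide)
                have h_ible : PySem.Chars.endswith w ['i','b','l','e'] = false := pvNotBoth h_tion (by decide) (by decide)
                have h_ful : PySem.Chars.endswith w ['f','u','l'] = false := pvNotBoth h_tion (by decide) (by decide)
                by_cases hm : (6 : Int) < (w.length : Int)
                · simp [pvChainA, pvLoopA, pvSuffixesA, pvCoreB, pvMatchesB, pvRulesB, pvMinB, pvTupLt, hS', hies', hes', hless', hness', h_ing', h_ed', h_er', h_est', h_ly', h_tion, h_sion, h_ment, h_able, h_ible, h_ful, hm]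
                · simp [pvChainA, pvLoopA, pvSuffixesA, pvCoreB, pvMatchesB, pvRulesB, pvMinB, pvTupLt, hS', hies', hes', hless', hness', h_ing', h_ed', h_er', h_est', h_ly', h_tion, h_sion, h_ment, h_able, h_ible, h_ful, hm]
              · have h_tion' : PySem.Chars.endswith w ['t','i','o','n'] = false := pvBF h_tion
                by_cases h_sion : PySem.Chars.endswith w ['s','i','o','n'] = true
                · have h_ment : PySem.Chars.endswith w ['m','e','n','t'] = false := pvNotBoth h_sion (by decide) (by decide)
                  have h_able : PySem.Chars.endswith w ['a','b','l','e'] = false := pvNotBoth h_sion (by decide) (by decide)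
                  have h_ible : PySem.Chars.endswith w ['i','b','l','e'] = false := pvNotBoth h_sion (by decide) (by decide)
                  have h_ful : PySem.Chars.endswith w ['f','u','l'] = false := pvNotBoth h_sion (by decide) (by decide)
                  by_cases hm : (6 : Int) < (w.length : Int)
                  · simp [pvChainA, pvLoopA, pvSuffixesA, pvCoreB, pvMatchesB, pvRulesB, pvMinB, pvTupLt, hS', hies', hes', hless', hness', h_ing', h_ed', h_er', h_est', h_ly', h_tion', h_sion, h_ment, h_able, h_ible, h_ful, hm]
                  · simp [pvChainA, pvLoopA, pvSuffixesA, pvCoreB, pvMatchesB, pvRulesB, pvMinB, pvTupLt, hS', hies', hes', hless', hness', h_ing', h_ed', h_er', h_est', h_ly', h_tion', h_sion, h_ment, h_able, h_ible, h_ful, hm]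
                · have h_sion' : PySem.Chars.endswith w ['s','i','o','n'] = false := pvBF h_sion
                  by_cases h_ment : PySem.Chars.endswith w ['m','e','n','t'] = true
                  · have h_able : PySem.Chars.endswith w ['a','b','l','e'] = false := pvNotBoth h_ment (by decide) (by decide)
                    have h_ible : PySem.Chars.endswith w ['i','b','l','e'] = false := pvNotBoth h_ment (by decide) (by decide)
                    have h_ful : PySem.Chars.endswith w ['f','u','l'] = false := pvNotBoth h_ment (by decide) (by decide)
                    by_cases hm : (6 : Int) < (w.length : Int)
                    · simp [pvChainA, pvLoopA, pvSuffixesA, pvCoreB, pvMatchesB, pvRulesB, pvMinB, pvTupLt, hS', hies', hes', hless', hness', h_ing', h_ed', h_er', h_est', h_ly', h_tion', h_sion', h_ment, h_able, h_ible, h_ful, hm]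
                    · simp [pvChainA, pvLoopA, pvSuffixesA, pvCoreB, pvMatchesB, pvRulesB, pvMinB, pvTupLt, hS', hies', hes', hless', hness', h_ing', h_ed', h_er', h_est', h_ly', h_tion', h_sion', h_ment, h_able, h_ible, h_ful, hm]
                  · have h_ment' : PySem.Chars.endswith w ['m','e','n','t'] = false := pvBF h_ment
                    by_cases h_able : PySem.Chars.endswith w ['a','b','l','e'] = true
                    · have h_ible : PySem.Chars.endswith w ['i','b','l','e'] = false := pvNotBoth h_able (by decide) (by decide)
                      have h_ful : PySem.Chars.endswith w ['f','u','l'] = false := pvNotBoth h_able (by decide) (by decide)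
                      by_cases hm : (6 : Int) < (w.length : Int)
                      · simp [pvChainA, pvLoopA, pvSuffixesA, pvCoreB, pvMatchesB, pvRulesB, pvMinB, pvTupLt, hS', hies', hes', hless', hness', h_ing', h_ed', h_er', h_est', h_ly', h_tion', h_sion', h_ment', h_able, h_ible, h_ful, hm]
                      · simp [pvChainA, pvLoopA, pvSuffixesA, pvCoreB, pvMatchesB, pvRulesB, pvMinB, pvTupLt, hS', hies', hes', hless', hness', h_ing', h_ed', h_er', h_est', h_ly', h_tion', h_sion', h_ment', h_able, h_ible, h_ful, hm]
                    · have h_able' : PySem.Chars.endswith w ['a','b','l','e'] = false := pvBF h_able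
                      by_cases h_ible : PySem.Chars.endswith w ['i','b','l','e'] = true
                      · have h_ful : PySem.Chars.endswith w ['f','u','l'] = false := pvNotBoth h_ible (by decide) (by decide)
                        by_cases hm : (6 : Int) < (w.length : Int)
                        · simp [pvChainA, pvLoopA, pvSuffixesA, pvCoreB, pvMatchesB, pvRulesB, pvMinB, pvTupLt, hS', hies', hes', hless', hness', h_ing', h_ed', h_er', h_est', h_ly', h_tion', h_sion', h_ment', h_able', h_ible, h_ful, hm]
                        · simp [pvChainA, pvLoopA, pvSuffixesA, pvCoreB, pvMatchesB, pvRulesB, pvMinB, pvTupLt, hS', hies', hes', hless', hness', h_ing', h_ed', h_er', h_est', h_ly', h_tion', h_sion', h_ment', h_able', h_ible, h_ful, hm]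
                      · have h_ible' : PySem.Chars.endswith w ['i','b','l','e'] = false := pvBF h_ible
                        by_cases h_ful : PySem.Chars.endswith w ['f','u','l'] = true
                        · by_cases hm : (5 : Int) < (w.length : Int)
                          · simp [pvChainA, pvLoopA, pvSuffixesA, pvCoreB, pvMatchesB, pvRulesB, pvMinB, pvTupLt, hS', hies', hes', hless', hness', h_ing', h_ed', h_er', h_est', h_ly', h_tion', h_sion', h_ment', h_able', h_ible', h_ful, hm]
                          · simp [pvChainA, pvLoopA, pvSuffixesA, pvCoreB, pvMatchesB, pvRulesB, pvMinB, pvTupLt, hS', hies', hes', hless', hness', h_ing', h_ed', h_er', h_est', h_ly', h_tion', h_sion', h_ment', h_able', h_ible', h_ful, hm]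
                        · have h_ful' : PySem.Chars.endswith w ['f','u','l'] = false := pvBF h_ful
                          simp [pvChainA, pvLoopA, pvSuffixesA, pvCoreB, pvMatchesB, pvRulesB, pvMinB, pvTupLt, hS', hies', hes', hless', hness', h_ing', h_ed', h_er', h_est', h_ly', h_tion', h_sion', h_ment', h_able', h_ible', h_ful']

-- ===== VERDICT =====
theorem normalize_word_spec : Claim_equal_normalize_word := by
  intro word _
  unfold Spec_normalize_word normalize_word normalize_word_alt
  exact congrArg String.ofList (pvCoreEq _)
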